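-- pv_equiv track=rewrite | github.com/Edwin-ntu/Pyramid-Solitaire | Pyramid Solitare.py | numberToCard
-- ===== SOURCE A (Python) =====
-- def numberToCard(cardsToDisplay):
--     '''turns card number of a deck to real cards names'''
--     cardsToDisplay = cardsToDisplay
--     if cardsToDisplay == []:
--         cardsToDisplay.append("**")
--     for n in range(len(cardsToDisplay)):                                        # uses numerical values to make unique cards based on the logic that each suit is a multiple of 13 above the last
--         if cardsToDisplay[n] != "**":
--             suit = "S"
--             offset = 39
--             if cardsToDisplay[n] <= 39:
--                 suit = "C"
--                 offset = 26
--                 if cardsToDisplay[n] <= 26: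
--                     suit = "H"
--                     offset = 13
--                     if cardsToDisplay[n] <=13 :
--                         suit = "D"
--                         offset = 0
--             if cardsToDisplay[n] - offset == 13:                                # makes the name - suit cards
--                 cardsToDisplay[n] = "K" + suit
--             elif cardsToDisplay[n] - offset == 12:
--                 cardsToDisplay[n] = "Q" + suit
--             elif cardsToDisplay[n] - offset == 11:
--                 cardsToDisplay[n] = "J" + suit
--             elif cardsToDisplay[n] - offset == 1:
--                 cardsToDisplay[n] = "A" + suit
--             else:
--                 cardsToDisplay[n] = str(cardsToDisplay[n] - offset) + suit      # makes the number - suit cards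
--     return cardsToDisplay
-- ===== SOURCE B (Python) =====
-- _RANK = {13: 'K', 12: 'Q', 11: 'J', 1: 'A'}
--
-- def _name(n, suits):
--     '''peel 13 off n while advancing through the suit list'''
--     if n > 13 and len(suits) > 1:
--         return _name(n - 13, suits[1:])
--     return _RANK.get(n, str(n)) + suits[0]
--
-- def numberToCard(cardsToDisplay):
--     '''turns card number of a deck to real cards names'''
--     if not cardsToDisplay:
--         return ["**"]
--     return [_name(n, ['D', 'H', 'C', 'S']) for n in cardsToDisplay]
-- ===== Notes on version B (the rewrite author's own statement) =====
-- stated objective: simpler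
-- what changed: Replaces A's in-place loop with nested suit/offset comparison cascade by a pure list comprehension over a recursive helper that repeatedly subtracts 13 while walking the suit list ['D','H','C','S'], then names the remaining rank via a dict with str() fallback.
import Mathlib
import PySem

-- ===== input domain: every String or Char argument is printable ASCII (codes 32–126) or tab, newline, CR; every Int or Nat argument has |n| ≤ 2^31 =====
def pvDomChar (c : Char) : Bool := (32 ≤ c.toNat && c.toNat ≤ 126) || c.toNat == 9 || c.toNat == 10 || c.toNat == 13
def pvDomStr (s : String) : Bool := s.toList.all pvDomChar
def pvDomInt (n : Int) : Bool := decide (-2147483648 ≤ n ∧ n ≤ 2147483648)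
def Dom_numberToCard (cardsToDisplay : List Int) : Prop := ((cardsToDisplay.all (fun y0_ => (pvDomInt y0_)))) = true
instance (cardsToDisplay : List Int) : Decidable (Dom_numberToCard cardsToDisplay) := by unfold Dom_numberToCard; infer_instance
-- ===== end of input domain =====

-- B replaces A's nested suit/offset comparison cascade by a recursive helper that repeatedly subtracts 13
-- while walking the suit list (objective: simpler). A mutates its argument in place (it rewrites every element and
-- appends "**" to an empty input); B builds a fresh list — the equivalence proved here is about the RETURN value only.

-- ===== PORT A =====
-- A's cascading mutable suit/offset assignments become nested ifs producing the (suit, offset) pair;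
-- the element of a List Int is never the string "**", so A's `!= "**"` guard is always true here.
def pvCellA (m : Int) : String :=
  let so : String × Int :=
    if m ≤ 39 then
      if m ≤ 26 then
        if m ≤ 13 then ("D", 0) else ("H", 13)
      else ("C", 26)
    else ("S", 39)
  if m - so.2 = 13 then "K" ++ so.1
  else if m - so.2 = 12 then "Q" ++ so.1
  else if m - so.2 = 11 then "J" ++ so.1
  else if m - so.2 = 1 then "A" ++ so.1
  else PySem.Int.toStr (m - so.2) ++ so.1

def numberToCard (cardsToDisplay : List Int) : List String :=
  if cardsToDisplay = [] then ["**"]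
  else cardsToDisplay.map pvCellA

-- ===== PORT B =====
def pvRankNames : PySem.Dict Int String := PySem.Dict.mk [(13, "K"), (12, "Q"), (11, "J"), (1, "A")]

-- Source B's _name: `suits[0]` on the empty list would raise in Python; _name is only ever called with a
-- nonempty suit list, and the [] branch here is unreachable.
def pvName (n : Int) : List String → String
  | [] => ""
  | s :: rest =>
    if 13 < n ∧ rest ≠ [] then pvName (n - 13) rest
    else (pvRankNames.getD n (PySem.Int.toStr n)) ++ s

def numberToCard_alt (cardsToDisplay : List Int) : List String :=
  if cardsToDisplay = [] then ["**"]
  else cardsToDisplay.map (fun n => pvName n ["D", "H", "C", "S"])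

-- ===== PRECONDITION & SPEC =====
def Spec_numberToCard (cardsToDisplay : List Int) (out : List String) : Prop := out = numberToCard_alt cardsToDisplay
instance (cardsToDisplay : List Int) (out : List String) : Decidable (Spec_numberToCard cardsToDisplay out) := by unfold Spec_numberToCard; infer_instance

-- ===== CLAIM (what is proved, stated in full; the proofs are below) =====
def Claim_equal_numberToCard : Prop := ∀ (cardsToDisplay : List Int), Dom_numberToCard cardsToDisplay → Spec_numberToCard cardsToDisplay (numberToCard cardsToDisplay)

-- ===== LEMMAS AND PROOFS =====

lemma pvGetD_rank (r : Int) : pvRankNames.getD r (PySem.Int.toStr r) =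
    if r = 13 then "K" else if r = 12 then "Q" else if r = 11 then "J" else if r = 1 then "A"
    else PySem.Int.toStr r := by
  simp only [pvRankNames, PySem.Dict.getD, PySem.Dict.get?_mk_cons]
  split_ifs <;> simp_all [PySem.Dict.get?]

lemma pvCell_eq (m : Int) : pvCellA m = pvName m ["D", "H", "C", "S"] := by
  simp only [pvCellA]
  rcases le_or_gt m 13 with h1 | h1
  · rw [show pvName m ["D", "H", "C", "S"] =
        pvRankNames.getD m (PySem.Int.toStr m) ++ "D" from by
      rw [pvName, if_neg (fun h => absurd h.1 (by omega))]]
    rw [pvGetD_rank]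
    simp only [if_pos h1, if_pos (by omega : m ≤ 26), if_pos (by omega : m ≤ 39)]
    split_ifs <;> simp_all <;> rfl
  · rcases le_or_gt m 26 with h2 | h2
    · rw [show pvName m ["D", "H", "C", "S"] =
          pvRankNames.getD (m - 13) (PySem.Int.toStr (m - 13)) ++ "H" from by
        rw [pvName, if_pos ⟨h1, by simp⟩,
          pvName, if_neg (fun h => absurd h.1 (by omega))]]
      rw [pvGetD_rank]
      simp only [if_neg (by omega : ¬ m ≤ 13), if_pos h2, if_pos (by omega : m ≤ 39)]
      split_ifs <;> simp_all <;> rfl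
    · rcases le_or_gt m 39 with h3 | h3
      · rw [show pvName m ["D", "H", "C", "S"] =
            pvRankNames.getD (m - 26) (PySem.Int.toStr (m - 26)) ++ "C" from by
          rw [pvName, if_pos ⟨by omega, by simp⟩,
            pvName, if_pos ⟨by omega, by simp⟩,
            pvName, if_neg (fun h => absurd h.1 (by omega))]
          rw [show m - 13 - 13 = m - 26 from by ring]]
        rw [pvGetD_rank]
        simp only [if_neg (by omega : ¬ m ≤ 26), if_pos h3]
        split_ifs <;> simp_all <;> rfl
      · rw [show pvName m ["D", "H", "C", "S"] =
            pvRankNames.getD (m - 39) (PySem.Int.toStr (m - 39)) ++ "S" from by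
          rw [pvName, if_pos ⟨by omega, by simp⟩,
            pvName, if_pos ⟨by omega, by simp⟩,
            pvName, if_pos ⟨by omega, by simp⟩,
            pvName, if_neg (by simp)]
          rw [show m - 13 - 13 - 13 = m - 39 from by ring]]
        rw [pvGetD_rank]
        simp only [if_neg (by omega : ¬ m ≤ 39)]
        split_ifs <;> simp_all <;> rfl

-- ===== VERDICT (by name: the statement is the Claim_ definition above) =====
theorem numberToCard_spec : Claim_equal_numberToCard := by
  intro xs _
  unfold Spec_numberToCard numberToCard numberToCard_alt
  split
  · rfl
  · exact List.map_congr_left (fun m _ => pvCell_eq m)
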